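-- pv_equiv track=rewrite | github.com/Veymo-geek/UVOT | tts.py | split_subtitles_into_phrases
-- ===== SOURCE A (Python) =====
-- def split_subtitles_into_phrases(subtitles_lines):
--     phrases = []
--     current_phrase = []
--     for line in subtitles_lines:
--         if line.strip().isdigit():
--             if current_phrase:
--                 phrases.append(current_phrase)
--                 current_phrase = []
--         else:
--             current_phrase.append(line.strip())
--     if current_phrase:
--         phrases.append(current_phrase)
--     return phrases
-- ===== SOURCE B (Python) =====
-- def split_subtitles_into_phrases(subtitles_lines):
--     def is_sep(line):
--         return line.strip().isdigit()
--
--     phrases = []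
--     i, n = 0, len(subtitles_lines)
--     while i < n:
--         if is_sep(subtitles_lines[i]):
--             i += 1
--         else:
--             j = i
--             while j < n and not is_sep(subtitles_lines[j]):
--                 j += 1
--             phrases.append([line.strip() for line in subtitles_lines[i:j]])
--             i = j
--     return phrases
-- ===== Notes on version B (the rewrite author's own statement) =====
-- stated objective: alternative
-- what changed: Replaces A's state-machine loop carrying a current_phrase accumulator with run-splitting: skip digit separator lines, scan to the end of each maximal run of non-separator lines, and emit that whole run (stripped) at once.
import Mathlib
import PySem

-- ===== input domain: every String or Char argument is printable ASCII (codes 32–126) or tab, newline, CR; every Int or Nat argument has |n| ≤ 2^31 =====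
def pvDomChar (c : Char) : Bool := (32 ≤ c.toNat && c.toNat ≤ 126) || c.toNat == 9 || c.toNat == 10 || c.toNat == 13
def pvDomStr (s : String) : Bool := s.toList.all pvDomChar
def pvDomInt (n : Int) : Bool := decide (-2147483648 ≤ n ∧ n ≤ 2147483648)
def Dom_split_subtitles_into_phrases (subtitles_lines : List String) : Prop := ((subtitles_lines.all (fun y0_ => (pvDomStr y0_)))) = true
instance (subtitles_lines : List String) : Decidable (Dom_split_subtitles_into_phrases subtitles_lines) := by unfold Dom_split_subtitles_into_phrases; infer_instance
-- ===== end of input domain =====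

-- B replaces A's state-machine loop (current_phrase accumulator) with run-splitting:
-- skip digit separator lines and emit each maximal run of non-separator lines at once (alternative decomposition, same cost).

-- a line is a separator iff its stripped form is a digit string (shared predicate of both Pythons)
def pvIsSep (line : String) : Bool := PySem.Str.strIsdigit (PySem.Str.strip line)

-- ===== PORT A =====
-- A's loop: state (phrases, current_phrase), then a final flush of current_phrase
def split_subtitles_into_phrases (subtitles_lines : List String) : List (List String) :=
  let st := subtitles_lines.foldl
    (fun (st : List (List String) × List String) line =>
      if pvIsSep line then
        if st.2 ≠ [] then (st.1 ++ [st.2], []) else st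
      else
        (st.1, st.2 ++ [PySem.Str.strip line]))
    ([], [])
  if st.2 ≠ [] then st.1 ++ [st.2] else st.1

-- ===== PORT B =====
-- B's outer while loop: skip a separator, or split off the maximal non-separator run
-- (the inner index scan j and the slice lines[i:j] are takeWhile/dropWhile of the remaining lines)
def split_subtitles_into_phrases_alt (subtitles_lines : List String) : List (List String) :=
  match subtitles_lines with
  | [] => []
  | x :: xs =>
    if pvIsSep x then
      split_subtitles_into_phrases_alt xs
    else
      ((x :: xs.takeWhile (fun y => !pvIsSep y)).map PySem.Str.strip) ::
        split_subtitles_into_phrases_alt (xs.dropWhile (fun y => !pvIsSep y))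
termination_by subtitles_lines.length
decreasing_by
  all_goals simp only [List.length_cons]
  all_goals first
    | omega
    | exact Nat.lt_succ_of_le (List.length_dropWhile_le _ _)

-- ===== PRECONDITION & SPEC =====
def Spec_split_subtitles_into_phrases (subtitles_lines : List String) (out : List (List String)) : Prop := out = split_subtitles_into_phrases_alt subtitles_lines
instance (subtitles_lines : List String) (out : List (List String)) : Decidable (Spec_split_subtitles_into_phrases subtitles_lines out) := by unfold Spec_split_subtitles_into_phrases; infer_instance

-- ===== CLAIM (what is proved, stated in full; the proofs are below) =====
def Claim_equal_split_subtitles_into_phrases : Prop := ∀ (subtitles_lines : List String), Dom_split_subtitles_into_phrases subtitles_lines → Spec_split_subtitles_into_phrases subtitles_lines (split_subtitles_into_phrases subtitles_lines)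

-- ===== LEMMAS AND PROOFS =====

-- A's loop with a pending current phrase, inlined as a direct recursion
def pvPend (cur : List String) : List String → List (List String)
  | [] => if cur ≠ [] then [cur] else []
  | x :: xs =>
    if pvIsSep x then (if cur ≠ [] then [cur] else []) ++ pvPend [] xs
    else pvPend (cur ++ [PySem.Str.strip x]) xs

-- A's loop body and final flush, named for the proofs (definitionally the lambdas in the port)
def pvStep (st : List (List String) × List String) (line : String) : List (List String) × List String :=
  if pvIsSep line then
    if st.2 ≠ [] then (st.1 ++ [st.2], []) else st
  else
    (st.1, st.2 ++ [PySem.Str.strip line])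

def pvFlush (st : List (List String) × List String) : List (List String) :=
  if st.2 ≠ [] then st.1 ++ [st.2] else st.1

-- A's foldl+flush equals phrases ++ pvPend cur lines
theorem pv_foldl_eq_pend (lines : List String) : ∀ (phrases : List (List String)) (cur : List String),
    pvFlush (lines.foldl pvStep (phrases, cur)) = phrases ++ pvPend cur lines := by
  induction lines with
  | nil =>
    intro phrases cur
    by_cases hc : cur = [] <;> simp [pvFlush, pvPend, hc]
  | cons x xs ih =>
    intro phrases cur
    rw [List.foldl_cons]
    by_cases hs : pvIsSep x
    · by_cases hc : cur = []
      · have hstep : pvStep (phrases, cur) x = (phrases, cur) := by simp [pvStep, hs, hc]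
        rw [hstep, ih phrases cur, pvPend]
        simp [hs, hc]
      · have hstep : pvStep (phrases, cur) x = (phrases ++ [cur], []) := by simp [pvStep, hs, hc]
        rw [hstep, ih (phrases ++ [cur]) [], pvPend]
        simp [hs, hc]
    · have hstep : pvStep (phrases, cur) x = (phrases, cur ++ [PySem.Str.strip x]) := by
        simp [pvStep, hs]
      rw [hstep, ih phrases (cur ++ [PySem.Str.strip x]), pvPend]
      simp [hs]

-- running pvPend through a non-separator run accumulates the stripped run
theorem pv_pend_run (run : List String) : ∀ (cur rest : List String),
    (∀ y ∈ run, pvIsSep y = false) →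
    pvPend cur (run ++ rest) = pvPend (cur ++ run.map PySem.Str.strip) rest := by
  induction run with
  | nil => intro cur rest _; simp
  | cons y ys ih =>
    intro cur rest h
    have hy : pvIsSep y = false := h y (by simp)
    simp only [List.cons_append, pvPend, hy, Bool.false_eq_true, if_false]
    rw [ih (cur ++ [PySem.Str.strip y]) rest (fun z hz => h z (by simp [hz]))]
    simp

theorem pv_dropWhile_head (p : String → Bool) (xs : List String) :
    ∀ y ys, xs.dropWhile p = y :: ys → p y = false := by
  induction xs with
  | nil => intro y ys h; simp [List.dropWhile] at h
  | cons a as ih =>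
    intro y ys h
    rw [List.dropWhile_cons] at h
    by_cases ha : p a
    · simp [ha] at h; exact ih y ys h
    · simp [ha] at h; rw [← h.1]; simpa using ha

-- pvPend [] equals B, by strong induction on length
theorem pv_pend_eq_alt : ∀ (n : Nat) (lines : List String), lines.length ≤ n →
    pvPend [] lines = split_subtitles_into_phrases_alt lines := by
  intro n
  induction n with
  | zero => intro lines h; simp at h; simp [h, pvPend, split_subtitles_into_phrases_alt]
  | succ n ih =>
    intro lines h
    match lines with
    | [] => simp [pvPend, split_subtitles_into_phrases_alt]
    | x :: xs =>
      simp only [List.length_cons, Nat.succ_le_succ_iff] at h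
      by_cases hs : pvIsSep x
      · rw [pvPend, split_subtitles_into_phrases_alt]
        simp only [hs, if_true]
        simpa using ih xs h
      · rw [pvPend, split_subtitles_into_phrases_alt]
        simp only [hs, Bool.false_eq_true, if_false]
        set run := xs.takeWhile (fun y => !pvIsSep y) with hrun
        set rest := xs.dropWhile (fun y => !pvIsSep y) with hrest
        have hsplit : xs = run ++ rest := (List.takeWhile_append_dropWhile).symm
        have hall : ∀ y ∈ run, pvIsSep y = false := by
          intro y hy
          have := List.mem_takeWhile_imp hy
          simpa using this
        rw [hsplit]
        simp only [List.nil_append]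
        rw [pv_pend_run run [PySem.Str.strip x] rest hall]
        have hlrest : rest.length ≤ n := by
          rw [hrest]
          exact le_trans (List.length_dropWhile_le _ _) h
        match hr : rest with
        | [] => simp [pvPend, split_subtitles_into_phrases_alt]
        | y :: ys =>
          have hy : pvIsSep y = true := by
            have hdw : List.dropWhile (fun y => !pvIsSep y) xs = y :: ys := by
              rw [← hrest]
            have := pv_dropWhile_head (fun y => !pvIsSep y) xs y ys hdw
            simpa using this
          rw [pvPend]
          simp only [hy, if_true]
          have hys : ys.length ≤ n := by simp at hlrest; omega
          rw [ih ys hys, split_subtitles_into_phrases_alt]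
          simp [hy]

-- ===== VERDICT (by name: the statement is the Claim_ definition above) =====
theorem split_subtitles_into_phrases_spec : Claim_equal_split_subtitles_into_phrases := by
  intro lines _
  unfold Spec_split_subtitles_into_phrases
  show pvFlush (lines.foldl pvStep ([], [])) = _
  rw [pv_foldl_eq_pend lines [] []]
  simpa using pv_pend_eq_alt lines.length lines le_rfl
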